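-- pv_equiv track=rewrite | github.com/SutraMind/ReqSafe | memory_management/utils/validators.py | validate_concepts_list
-- ===== SOURCE A (Python) =====
-- from typing import Dict, Any, List, Tuple, Optional, Union, Callable
--
-- def validate_concepts_list(concepts: List[str]) -> Tuple[bool, List[str]]:
--     """
--     Validate list of concepts.
--
--     Args:
--         concepts: List of concept strings
--
--     Returns:
--         Tuple of (is_valid, error_messages)
--     """
--     errors = []
--
--     if not isinstance(concepts, list):
--         errors.append("concepts must be a list")
--         return False, errors
--
--     if len(concepts) == 0:
--         errors.append("concepts list cannot be empty")
--         return False, errors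
--
--     for i, concept in enumerate(concepts):
--         if not isinstance(concept, str):
--             errors.append(f"concept at index {i} must be a string")
--         elif not concept.strip():
--             errors.append(f"concept at index {i} cannot be empty")
--
--     # Check for duplicates
--     unique_concepts = set(concept.strip().lower() for concept in concepts if isinstance(concept, str))
--     if len(unique_concepts) < len([c for c in concepts if isinstance(c, str)]):
--         errors.append("concepts list contains duplicates")
--
--     return len(errors) == 0, errors
-- ===== SOURCE B (Python) =====
-- from typing import List, Tuple
--
-- def validate_concepts_list(concepts: List[str]) -> Tuple[bool, List[str]]:
--     """Single-pass validation: duplicate detection is folded into the per-element loop."""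
--     errors = []
--
--     if not isinstance(concepts, list):
--         return False, ["concepts must be a list"]
--     if not concepts:
--         return False, ["concepts list cannot be empty"]
--
--     seen = set()
--     has_duplicate = False
--     for i, concept in enumerate(concepts):
--         if not isinstance(concept, str):
--             errors.append(f"concept at index {i} must be a string")
--             continue
--         if not concept.strip():
--             errors.append(f"concept at index {i} cannot be empty")
--         norm = concept.strip().lower()
--         if norm in seen:
--             has_duplicate = True
--         else:
--             seen.add(norm)
--
--     if has_duplicate:
--         errors.append("concepts list contains duplicates")
--
--     return not errors, errors
-- ===== Notes on version B (the rewrite author's own statement) =====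
-- stated objective: alternative
-- what changed: Duplicate detection is folded into the single per-element loop via a seen-set and a flag, replacing A's separate set-comprehension pass and length comparison; the duplicate error is still appended once, after the per-index errors.
import Mathlib
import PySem

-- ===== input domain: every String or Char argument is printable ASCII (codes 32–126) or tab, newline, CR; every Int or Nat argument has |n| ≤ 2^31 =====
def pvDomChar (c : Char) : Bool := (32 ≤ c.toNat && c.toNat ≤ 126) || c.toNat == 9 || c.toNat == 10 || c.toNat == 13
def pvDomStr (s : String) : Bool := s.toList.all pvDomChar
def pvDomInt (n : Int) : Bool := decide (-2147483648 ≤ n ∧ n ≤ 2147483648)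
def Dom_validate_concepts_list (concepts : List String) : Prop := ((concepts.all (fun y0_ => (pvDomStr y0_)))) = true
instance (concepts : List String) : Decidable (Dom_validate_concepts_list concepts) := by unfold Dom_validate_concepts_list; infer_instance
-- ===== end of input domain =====

-- B folds duplicate detection into the single per-element loop (seen-set + flag) instead of
-- A's separate set/comprehension pass; objective: alternative (same cost, one pass).


-- ===== PORT A =====
-- Under the type convention concepts : List String, so the isinstance checks are always true:
-- the "must be a list"/"must be a string" branches never fire and the comprehensions filter nothing.
def validate_concepts_list (concepts : List String) : Bool × List String :=
  let errors : List String := []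
  if concepts.length = 0 then
    (false, errors ++ ["concepts list cannot be empty"])
  else
    -- for i, concept in enumerate(concepts): elif not concept.strip(): append
    let errors := (PySem.List.enumerate concepts 0).foldl
      (fun errs p =>
        if PySem.Str.strip p.2 = "" then
          errs ++ ["concept at index " ++ PySem.Int.toStr p.1 ++ " cannot be empty"]
        else errs) errors
    -- unique_concepts = set(concept.strip().lower() for concept in concepts)
    let unique := PySem.Set.ofList (concepts.map (fun c => PySem.Str.lower (PySem.Str.strip c)))
    -- if len(unique_concepts) < len([c for c in concepts]):
    let errors := if unique.length < concepts.length then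
        errors ++ ["concepts list contains duplicates"]
      else errors
    (decide (errors.length = 0), errors)

-- ===== PORT B =====
def validate_concepts_list_alt (concepts : List String) : Bool × List String :=
  if concepts.length = 0 then
    (false, ["concepts list cannot be empty"])
  else
    let st := (PySem.List.enumerate concepts 0).foldl
      (fun (st : List String × PySem.Set String × Bool) p =>
        let errs := if PySem.Str.strip p.2 = "" then
            st.1 ++ ["concept at index " ++ PySem.Int.toStr p.1 ++ " cannot be empty"]
          else st.1
        let nrm := PySem.Str.lower (PySem.Str.strip p.2)
        if PySem.Set.contains st.2.1 nrm then (errs, st.2.1, true)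
        else (errs, PySem.Set.add st.2.1 nrm, st.2.2))
      ([], PySem.Set.empty, false)
    let errors := if st.2.2 then st.1 ++ ["concepts list contains duplicates"] else st.1
    (decide (errors.length = 0), errors)

-- ===== PRECONDITION & SPEC =====
def Spec_validate_concepts_list (concepts : List String) (out : Bool × List String) : Prop := out = validate_concepts_list_alt concepts
instance (concepts : List String) (out : Bool × List String) : Decidable (Spec_validate_concepts_list concepts out) := by unfold Spec_validate_concepts_list; infer_instance

-- ===== CLAIM (what is proved, stated in full; the proofs are below) =====
def Claim_equal_validate_concepts_list : Prop := ∀ (concepts : List String), Dom_validate_concepts_list concepts → Spec_validate_concepts_list concepts (validate_concepts_list concepts)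

-- ===== LEMMAS AND PROOFS =====

-- the length of set(xs) is short of len(xs) exactly when xs has a duplicate
theorem pv_ofList_length_lt_iff (xs : List String) :
    (PySem.Set.ofList xs).length < xs.length ↔ ¬ xs.Nodup := by
  induction xs using List.reverseRecOn with
  | nil => simp [PySem.Set.ofList_nil]
  | append_singleton t x ih =>
    rw [PySem.Set.ofList_append_singleton]
    have hnd : (t ++ [x]).Nodup ↔ t.Nodup ∧ x ∉ t := by
      rw [List.nodup_append]
      constructor
      · intro ⟨h1, _, h3⟩
        refine ⟨h1, fun hx => ?_⟩
        exact h3 x hx x (List.mem_singleton_self x) rfl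
      · intro ⟨h1, h2⟩
        refine ⟨h1, List.nodup_singleton x, ?_⟩
        intro a ha b hb
        rcases List.mem_singleton.1 hb with rfl
        intro hab
        exact h2 (hab ▸ ha)
    by_cases hx : x ∈ t
    · have hm : x ∈ PySem.Set.ofList t := (PySem.Set.mem_ofList t x).2 hx
      rw [PySem.Set.add_of_mem hm]
      have hle := PySem.Set.length_ofList_le (xs := t)
      simp only [List.length_append, List.length_singleton, hnd]
      constructor
      · intro _ h; exact h.2 hx
      · intro _; omega
    · have hm : x ∉ PySem.Set.ofList t := fun h => hx ((PySem.Set.mem_ofList t x).1 h)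
      rw [PySem.Set.add_of_not_mem hm]
      simp only [List.length_append, List.length_singleton, hnd]
      constructor
      · intro hlt h
        exact (ih.1 (by omega)) h.1
      · intro h
        have : ¬ t.Nodup := fun hndt => h ⟨hndt, hx⟩
        have := ih.2 this
        omega

-- the one-pass fold of B, characterised: errors accumulate as in A's loop, the flag records a duplicate
theorem pv_fold_B (l : List String) (s : Int) (errs seen : List String) (dup : Bool) :
    (PySem.List.enumerate l s).foldl
      (fun (st : List String × PySem.Set String × Bool) p =>
        let e := if PySem.Str.strip p.2 = "" then
            st.1 ++ ["concept at index " ++ PySem.Int.toStr p.1 ++ " cannot be empty"]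
          else st.1
        let nrm := PySem.Str.lower (PySem.Str.strip p.2)
        if PySem.Set.contains st.2.1 nrm then (e, st.2.1, true)
        else (e, PySem.Set.add st.2.1 nrm, st.2.2))
      (errs, seen, dup)
    = ((PySem.List.enumerate l s).foldl
        (fun errs p =>
          if PySem.Str.strip p.2 = "" then
            errs ++ ["concept at index " ++ PySem.Int.toStr p.1 ++ " cannot be empty"]
          else errs) errs,
       PySem.Set.update seen (l.map (fun c => PySem.Str.lower (PySem.Str.strip c))),
       dup || decide (¬ ((l.map (fun c => PySem.Str.lower (PySem.Str.strip c))).Nodup ∧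
                         ∀ n ∈ l.map (fun c => PySem.Str.lower (PySem.Str.strip c)), n ∉ seen))) := by
  induction l generalizing s errs seen dup with
  | nil => simp [PySem.List.enumerate_nil, PySem.Set.update_nil]
  | cons c t ih =>
    rw [PySem.List.enumerate_cons]
    simp only [List.foldl_cons, List.map_cons]
    by_cases hmem : PySem.Str.lower (PySem.Str.strip c) ∈ seen
    · have hc : PySem.Set.contains seen (PySem.Str.lower (PySem.Str.strip c)) = true := by
        rw [PySem.Set.contains_iff]; exact hmem
      simp only [hc, if_true]
      rw [ih]
      simp only [Prod.mk.injEq]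
      refine ⟨trivial, ?_, ?_⟩
      · rw [PySem.Set.update_cons, PySem.Set.add_of_mem hmem]
      · rw [Bool.true_or]
        symm
        simp only [Bool.or_eq_true, decide_eq_true_eq]
        right
        intro h
        exact h.2 _ List.mem_cons_self hmem
    · have hc : PySem.Set.contains seen (PySem.Str.lower (PySem.Str.strip c)) = false := by
        rw [Bool.eq_false_iff]
        intro h; exact hmem ((PySem.Set.contains_iff seen _).1 h)
      simp only [hc, Bool.false_eq_true, if_false]
      rw [ih]
      simp only [Prod.mk.injEq]
      refine ⟨trivial, ?_, ?_⟩
      · rw [PySem.Set.update_cons]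
      · have hiff : (¬ ((t.map (fun c => PySem.Str.lower (PySem.Str.strip c))).Nodup ∧
              ∀ n ∈ t.map (fun c => PySem.Str.lower (PySem.Str.strip c)), n ∉ PySem.Set.add seen (PySem.Str.lower (PySem.Str.strip c))))
            ↔ (¬ ((PySem.Str.lower (PySem.Str.strip c) :: t.map (fun c => PySem.Str.lower (PySem.Str.strip c))).Nodup ∧
              ∀ n ∈ PySem.Str.lower (PySem.Str.strip c) :: t.map (fun c => PySem.Str.lower (PySem.Str.strip c)), n ∉ seen)) := by
          rw [PySem.Set.add_of_not_mem hmem]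
          constructor
          · intro h ⟨hnd, hall⟩
            apply h
            rw [List.nodup_cons] at hnd
            refine ⟨hnd.2, ?_⟩
            intro n hn hn'
            rcases List.mem_append.1 hn' with h1 | h1
            · exact hall n (List.mem_cons_of_mem _ hn) h1
            · rcases List.mem_singleton.1 h1 with rfl
              exact hnd.1 hn
          · intro h ⟨hnd, hall⟩
            apply h
            constructor
            · rw [List.nodup_cons]
              refine ⟨?_, hnd⟩
              intro hcn
              exact hall _ hcn (by simp)
            · intro n hn
              rcases List.mem_cons.1 hn with rfl | hn2
              · exact hmem
              · intro hns
                exact (hall n hn2) (List.mem_append_left _ hns)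
        simp only [hiff]
        rfl

-- ===== VERDICT (by name: the statement is the Claim_ definition above) =====
theorem validate_concepts_list_spec : Claim_equal_validate_concepts_list := by
  intro concepts _
  unfold Spec_validate_concepts_list validate_concepts_list validate_concepts_list_alt
  by_cases h0 : concepts.length = 0
  · simp [h0]
  · simp only [h0, if_false]
    rw [pv_fold_B]
    have hdup : ((PySem.Set.ofList (concepts.map (fun c => PySem.Str.lower (PySem.Str.strip c)))).length < concepts.length)
        ↔ (false || decide (¬ ((concepts.map (fun c => PySem.Str.lower (PySem.Str.strip c))).Nodup ∧
              ∀ n ∈ concepts.map (fun c => PySem.Str.lower (PySem.Str.strip c)), n ∉ PySem.Set.empty))) = true := by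
      rw [Bool.false_or, decide_eq_true_eq]
      have h1 := pv_ofList_length_lt_iff (concepts.map (fun c => PySem.Str.lower (PySem.Str.strip c)))
      simp only [List.length_map] at h1
      rw [h1]
      simp [PySem.Set.empty]
    by_cases hd : (PySem.Set.ofList (concepts.map (fun c => PySem.Str.lower (PySem.Str.strip c)))).length < concepts.length
    · rw [if_pos hd, if_pos (hdup.1 hd)]
    · rw [if_neg hd, if_neg (fun hcond => hd (hdup.2 hcond))]
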